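-- pv_equiv track=rewrite | github.com/spiralgenetics/biograph | python/biograph/tools/mendelian_annotator.py | get_coverage_category
-- ===== SOURCE A (Python) =====
-- def get_coverage_category(format_keys, indivs):
--     """
--     Parse a vcf entry and set it's coverage category based on the min depth
--     of all samples
--     """
--     coverages = [0, 1, 10, 15]
--     depth_cat = None
--     idx = format_keys.index("DP")
--     get_cov = lambda x: None if x[idx] == '.' else int(x[idx])
--
--     for min_coverage in coverages:
--         min_covered = True
--         for sample in indivs:
--             data = sample.split(':')
--             cov = get_cov(data)
--             if cov is None:
--                 continue
--             if cov < min_coverage: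
--                 min_covered = False
--         if min_covered:
--             depth_cat = min_coverage
--     return depth_cat
-- ===== SOURCE B (Python) =====
-- def get_coverage_category(format_keys, indivs):
--     """Single pass: compute the minimum DP over all samples, then pick the
--     largest threshold in (0, 1, 10, 15) that is <= that minimum."""
--     idx = format_keys.index("DP")
--     mn = None
--     for sample in indivs:
--         field = sample.split(':')[idx]
--         if field == '.':
--             continue
--         v = int(field)
--         mn = v if mn is None else min(mn, v)
--     if mn is None:
--         return 15
--     best = None
--     for c in (0, 1, 10, 15):
--         if c <= mn:
--             best = c
--     return best
-- ===== Notes on version B (the rewrite author's own statement) =====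
-- stated objective: simpler
-- what changed: B replaces A's nested loop (re-parsing every sample once per threshold) by one pass computing the minimum DP across samples followed by a scan of the four thresholds.
import Mathlib
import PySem

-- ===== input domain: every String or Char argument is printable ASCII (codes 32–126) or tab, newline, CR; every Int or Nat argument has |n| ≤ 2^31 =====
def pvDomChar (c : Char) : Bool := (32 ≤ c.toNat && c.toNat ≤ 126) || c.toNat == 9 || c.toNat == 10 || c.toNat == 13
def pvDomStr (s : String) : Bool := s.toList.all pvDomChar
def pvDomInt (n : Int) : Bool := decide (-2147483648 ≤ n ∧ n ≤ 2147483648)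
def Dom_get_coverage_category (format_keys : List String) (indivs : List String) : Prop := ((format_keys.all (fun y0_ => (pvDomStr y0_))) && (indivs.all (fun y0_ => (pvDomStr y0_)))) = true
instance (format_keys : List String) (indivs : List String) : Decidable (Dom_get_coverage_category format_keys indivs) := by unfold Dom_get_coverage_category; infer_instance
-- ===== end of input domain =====

-- B replaces A's nested threshold loop by one pass computing the minimum DP, then a scan of the four thresholds (objective: simpler).


-- ===== PORT A =====
def get_coverage_category (format_keys : List String) (indivs : List String) : Option Int :=
  match PySem.List.index? format_keys "DP" with
  | none => none   -- Python raises ValueError here; excluded by Pre_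
  | some idx =>
    ([0, 1, 10, 15] : List Int).foldl (fun depth_cat min_coverage =>
      let min_covered := indivs.foldl (fun mc sample =>
        let data := ((PySem.Str.split? sample ":").getD [])
        match PySem.List.pyGet? data (idx : Int) with
        | none => mc  -- IndexError; excluded by Pre_
        | some f =>
          if f = "." then mc
          else
            match PySem.Int.ofStr? f with
            | none => mc  -- ValueError; excluded by Pre_
            | some cov => if cov < min_coverage then false else mc) true
      if min_covered then some min_coverage else depth_cat) none

-- ===== PORT B =====
def get_coverage_category_alt (format_keys : List String) (indivs : List String) : Option Int :=
  match PySem.List.index? format_keys "DP" with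
  | none => none   -- Python raises ValueError here; excluded by Pre_
  | some idx =>
    let mn := indivs.foldl (fun mn sample =>
      match PySem.List.pyGet? (((PySem.Str.split? sample ":").getD [])) (idx : Int) with
      | none => mn  -- IndexError; excluded by Pre_
      | some f =>
        if f = "." then mn
        else
          match PySem.Int.ofStr? f with
          | none => mn  -- ValueError; excluded by Pre_
          | some v => match mn with | none => some v | some cur => some (min cur v)) (none : Option Int)
    match mn with
    | none => some 15
    | some m => ([0, 1, 10, 15] : List Int).foldl (fun best c => if c ≤ m then some c else best) none

-- ===== PRECONDITION & SPEC =====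
-- Pre_ excludes exactly the inputs where Python A raises: "DP" missing from format_keys (ValueError from
-- list.index), a sample with too few ':'-fields (IndexError), or a DP field that is neither "." nor int-parseable (ValueError).
def pvFieldOK (format_keys : List String) (s : String) : Bool :=
  match PySem.List.pyGet? (((PySem.Str.split? s ":").getD [])) (((PySem.List.index? format_keys "DP").getD 0 : Nat) : Int) with
  | none => false
  | some f => f == "." || (PySem.Int.ofStr? f).isSome

def Pre_get_coverage_category (format_keys : List String) (indivs : List String) : Prop :=
  "DP" ∈ format_keys ∧ ∀ s ∈ indivs, pvFieldOK format_keys s = true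
instance (format_keys : List String) (indivs : List String) : Decidable (Pre_get_coverage_category format_keys indivs) := by unfold Pre_get_coverage_category; infer_instance

def pvWitness_get_coverage_category : List String × List String := (["GT", "DP"], ["0/1:12", "1/1:.", "0/0:7"])

def Spec_get_coverage_category (format_keys : List String) (indivs : List String) (out : Option Int) : Prop := out = get_coverage_category_alt format_keys indivs
instance (format_keys : List String) (indivs : List String) (out : Option Int) : Decidable (Spec_get_coverage_category format_keys indivs out) := by unfold Spec_get_coverage_category; infer_instance

-- ===== CLAIM (what is proved, stated in full; the proofs are below) =====
def Claim_equal_get_coverage_category : Prop := ∀ (format_keys : List String) (indivs : List String), Dom_get_coverage_category format_keys indivs → Pre_get_coverage_category format_keys indivs → Spec_get_coverage_category format_keys indivs (get_coverage_category format_keys indivs)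

-- ===== LEMMAS AND PROOFS =====

-- the DP value a sample contributes (none = "." or skipped): both inner loops factor through this
def pvParse (idx : Nat) (s : String) : Option Int :=
  match PySem.List.pyGet? (((PySem.Str.split? s ":").getD [])) (idx : Int) with
  | none => none
  | some f => if f = "." then none else PySem.Int.ofStr? f

def pvVals (idx : Nat) (l : List String) : List Int := l.filterMap (pvParse idx)

-- A's inner loop over samples computes: mc && (every contributed value ≥ c)
lemma innerA_eq (idx : Nat) (c : Int) (l : List String) (mc : Bool) :
    l.foldl (fun mc sample =>
      let data := ((PySem.Str.split? sample ":").getD [])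
      match PySem.List.pyGet? data (idx : Int) with
      | none => mc
      | some f =>
        if f = "." then mc
        else
          match PySem.Int.ofStr? f with
          | none => mc
          | some cov => if cov < c then false else mc) mc
    = (mc && (pvVals idx l).all (fun v => decide (c ≤ v))) := by
  induction l generalizing mc with
  | nil => simp [pvVals]
  | cons s t ih =>
    simp only [List.foldl_cons]
    cases h : PySem.List.pyGet? (((PySem.Str.split? s ":").getD [])) (idx : Int) with
    | none =>
      have hp : pvParse idx s = none := by simp only [pvParse, h]
      simp only [pvVals, List.filterMap_cons, hp]
      exact ih mc
    | some f =>
      by_cases hf : f = "."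
      · have hp : pvParse idx s = none := by simp only [pvParse, h, if_pos hf]
        simp only [if_pos hf, pvVals, List.filterMap_cons, hp]
        exact ih mc
      · cases ho : PySem.Int.ofStr? f with
        | none =>
          have hp : pvParse idx s = none := by simp only [pvParse, h, if_neg hf, ho]
          simp only [if_neg hf, ho, pvVals, List.filterMap_cons, hp]
          exact ih mc
        | some v =>
          have hp : pvParse idx s = some v := by simp only [pvParse, h, if_neg hf, ho]
          simp only [if_neg hf, ho, pvVals, List.filterMap_cons, hp, List.all_cons]
          by_cases hv : v < c
          · rw [if_pos hv, ih false]
            simp [not_le.mpr hv]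
          · rw [if_neg hv, ih mc, decide_eq_true (not_lt.mp hv), Bool.true_and]
            rfl

def pvMinStep (mn : Option Int) (v : Int) : Option Int :=
  match mn with | none => some v | some cur => some (min cur v)

-- B's pass over samples is the min-fold over the contributed values
lemma innerB_eq (idx : Nat) (l : List String) (m : Option Int) :
    l.foldl (fun mn sample =>
      match PySem.List.pyGet? (((PySem.Str.split? sample ":").getD [])) (idx : Int) with
      | none => mn
      | some f =>
        if f = "." then mn
        else
          match PySem.Int.ofStr? f with
          | none => mn
          | some v => match mn with | none => some v | some cur => some (min cur v)) m
    = (pvVals idx l).foldl pvMinStep m := by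
  induction l generalizing m with
  | nil => simp [pvVals]
  | cons s t ih =>
    simp only [List.foldl_cons]
    cases h : PySem.List.pyGet? (((PySem.Str.split? s ":").getD [])) (idx : Int) with
    | none =>
      have hp : pvParse idx s = none := by simp only [pvParse, h]
      simp only [pvVals, List.filterMap_cons, hp]
      exact ih m
    | some f =>
      by_cases hf : f = "."
      · have hp : pvParse idx s = none := by simp only [pvParse, h, if_pos hf]
        simp only [if_pos hf, pvVals, List.filterMap_cons, hp]
        exact ih m
      · cases ho : PySem.Int.ofStr? f with
        | none =>
          have hp : pvParse idx s = none := by simp only [pvParse, h, if_neg hf, ho]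
          simp only [if_neg hf, ho, pvVals, List.filterMap_cons, hp]
          exact ih m
        | some v =>
          have hp : pvParse idx s = some v := by simp only [pvParse, h, if_neg hf, ho]
          simp only [if_neg hf, ho, pvVals, List.filterMap_cons, hp, List.foldl_cons]
          exact ih (pvMinStep m v)

def pvLeOpt (c : Int) (m : Option Int) : Bool :=
  match m with | none => true | some x => decide (c ≤ x)

lemma all_ge_eq_min (c : Int) (vals : List Int) (m : Option Int) :
    (pvLeOpt c m && vals.all (fun v => decide (c ≤ v))) = pvLeOpt c (vals.foldl pvMinStep m) := by
  induction vals generalizing m with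
  | nil => simp
  | cons v t ih =>
    simp only [List.all_cons, List.foldl_cons, ← ih (pvMinStep m v)]
    cases m with
    | none => simp [pvMinStep, pvLeOpt]
    | some cur => simp [pvMinStep, pvLeOpt, Bool.and_assoc]

-- ===== VERDICT (by name: the statement is the Claim_ definition above) =====
theorem get_coverage_category_spec : Claim_equal_get_coverage_category := by
  intro format_keys indivs _ _
  unfold Spec_get_coverage_category get_coverage_category get_coverage_category_alt
  cases hidx : PySem.List.index? format_keys "DP" with
  | none => rfl
  | some idx =>
    simp only [List.foldl_cons, List.foldl_nil, innerA_eq, innerB_eq]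
    have key := fun c => all_ge_eq_min c (pvVals idx indivs) none
    simp only [pvLeOpt, Bool.true_and] at key
    rw [key 0, key 1, key 10, key 15]
    cases hm : (pvVals idx indivs).foldl pvMinStep none with
    | none => rfl
    | some m => simp
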